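-- pv_equiv track=rewrite | github.com/956MB/Kata | 6kyu/Row_of_odd_triangle/row.py | odd_row1
-- ===== SOURCE A (Python) =====
-- def odd_row1(n):
--     # addition method where you count the "outer" number of each n iterations
--     # better because we are not strictly adding + 2 and appending to arr every time, probably more efficient, but still times out
--     if n == 1: return [1]                   #          1
--                                             #        3  (5)  >> 1 + (4) >> 4 + 2 = (6)
--     num, arr = 4, []                        #      7   9 (11)  >> 5 + (6) >> 6 + 2 = (8)
--     last = num + 1                          #   13  15  17 (19)  >> 11 + (8) >> 8 + 2 = (10)
--                                             # 21  23  25  27 (29)  >> etc..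
--     for _ in range(n-2):
--         num += 2
--         last += num
--
--     for _ in range(n):
--         arr.insert(0, last)
--         last -= 2
--
--     return arr
-- ===== SOURCE B (Python) =====
-- def odd_row1(n):
--     start = n * (n - 1) + 1
--     return list(range(start, n * n + n, 2))
-- ===== Notes on version B (the rewrite author's own statement) =====
-- stated objective: faster
-- what changed: replaces the two accumulation loops (computing the row's last value by repeated addition, then building the list by repeated insert(0,..)) with the closed form start = n*(n-1)+1 and a single range(start, n*n+n, 2)
import Mathlib
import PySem

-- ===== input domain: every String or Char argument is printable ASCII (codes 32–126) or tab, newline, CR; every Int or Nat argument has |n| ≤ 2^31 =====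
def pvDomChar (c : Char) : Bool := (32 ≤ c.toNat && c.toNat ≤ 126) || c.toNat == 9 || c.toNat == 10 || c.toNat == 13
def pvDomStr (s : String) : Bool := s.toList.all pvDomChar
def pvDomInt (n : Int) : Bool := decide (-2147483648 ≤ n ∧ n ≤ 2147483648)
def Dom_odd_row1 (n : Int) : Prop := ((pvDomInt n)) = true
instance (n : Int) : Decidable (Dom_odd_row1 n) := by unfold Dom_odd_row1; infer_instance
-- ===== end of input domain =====

-- B computes the row by the closed form start = n*(n-1)+1 and one range(start, n*n+n, 2);
-- A accumulates the last value with one loop and builds the list with insert(0, ..) in a second loop (O(n^2)).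

-- ===== PORT A =====
def odd_row1 (n : Int) : List Int :=
  if n = 1 then [1]
  else
    -- num, arr = 4, []; last = num + 1; for _ in range(n-2): num += 2; last += num
    let st1 : Int × Int :=
      (PySem.List.pyRange 0 (n - 2) 1).foldl
        (fun (p : Int × Int) _ => (p.1 + 2, p.2 + (p.1 + 2))) (4, 4 + 1)
    -- for _ in range(n): arr.insert(0, last); last -= 2
    let st2 : List Int × Int :=
      (PySem.List.pyRange 0 n 1).foldl
        (fun (p : List Int × Int) _ => (PySem.List.insert p.1 0 p.2, p.2 - 2)) ([], st1.2)
    st2.1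

-- ===== PORT B =====
def odd_row1_alt (n : Int) : List Int :=
  let start := n * (n - 1) + 1
  PySem.List.pyRange start (n * n + n) 2

-- ===== PRECONDITION & SPEC =====
def Spec_odd_row1 (n : Int) (out : List Int) : Prop := out = odd_row1_alt n
instance (n : Int) (out : List Int) : Decidable (Spec_odd_row1 n out) := by unfold Spec_odd_row1; infer_instance

-- ===== CLAIM (what is proved, stated in full; the proofs are below) =====
def Claim_equal_odd_row1 : Prop := ∀ (n : Int), Dom_odd_row1 n → Spec_odd_row1 n (odd_row1 n)

-- ===== LEMMAS AND PROOFS =====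

-- a foldl that ignores the elements only depends on the list's length
theorem pvFoldl_const {α β : Type} (g : α → α) (l : List β) (i : α) :
    l.foldl (fun a _ => g a) i = g^[l.length] i := by
  induction l generalizing i with
  | nil => rfl
  | cons x xs ih => simp [List.foldl_cons, ih, Function.iterate_succ_apply]

-- first loop of A: closed form of (num, last) after m iterations
theorem pvLoop1 (m : Nat) (num last : Int) :
    (fun (p : Int × Int) => (p.1 + 2, p.2 + (p.1 + 2)))^[m] (num, last)
      = (num + 2 * m, last + m * num + m * (m + 1)) := by
  induction m with
  | zero => simp
  | succ m ih =>
    rw [Function.iterate_succ_apply', ih]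
    refine Prod.ext ?_ ?_ <;> · simp; ring

-- second loop of A: closed form of (arr, last) after m iterations
theorem pvLoop2 (m : Nat) (arr : List Int) (last : Int) :
    (fun (p : List Int × Int) => (p.2 :: p.1, p.2 - 2))^[m] (arr, last)
      = (((List.range m).map (fun i : Nat => last - 2 * (i : Int))).reverse ++ arr, last - 2 * m) := by
  induction m with
  | zero => simp
  | succ m ih =>
    rw [Function.iterate_succ_apply', ih]
    refine Prod.ext ?_ ?_
    · simp [List.range_succ]
    · simp; ring

theorem pvRevMapRange (N : Nat) (f : Nat → Int) :
    ((List.range N).map f).reverse = (List.range N).map (fun i => f (N - 1 - i)) := by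
  induction N with
  | zero => rfl
  | succ N ih =>
    conv_lhs => rw [List.range_succ]
    conv_rhs => rw [List.range_succ_eq_map]
    simp only [List.map_append, List.map_cons, List.map_nil, List.reverse_append,
      List.reverse_cons, List.reverse_nil, List.nil_append, List.map_map, ih, Function.comp_def]
    simp only [List.cons_append, List.nil_append, Nat.add_sub_cancel, List.cons.injEq]
    refine ⟨by simp, List.map_congr_left ?_⟩
    intro a ha
    congr 1
    omega

-- ===== VERDICT (by name: the statement is the Claim_ definition above) =====
theorem odd_row1_spec : Claim_equal_odd_row1 := by
  intro n _
  show odd_row1 n = odd_row1_alt n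
  by_cases h1 : n = 1
  · subst h1
    simp [odd_row1, odd_row1_alt, PySem.List.pyRange_of_pos (a := 1) (b := 2) (s := 2) (by norm_num)]
  · unfold odd_row1 odd_row1_alt
    rw [if_neg h1]
    dsimp only
    by_cases hle : n ≤ 0
    · rw [PySem.List.pyRange_one_eq_nil (by omega), PySem.List.pyRange_one_eq_nil hle]
      rw [PySem.List.pyRange_of_pos _ _ (by norm_num : (0:Int) < 2), if_neg (by nlinarith)]
      simp
    · -- n ≥ 2
      have hn2 : 2 ≤ n := by omega
      rw [pvFoldl_const, pvFoldl_const, PySem.List.length_pyRange_one, PySem.List.length_pyRange_one]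
      rw [pvLoop1]
      simp only [PySem.List.insert_zero]
      rw [pvLoop2]
      have hm : ((n - 2 - 0).toNat : Int) = n - 2 := by omega
      have hN : ((n - 0).toNat : Int) = n := by omega
      set N := (n - 0).toNat with hNdef
      have hlast : (4 : Int) + 1 + ((n - 2 - 0).toNat : Int) * 4
          + ((n - 2 - 0).toNat : Int) * (((n - 2 - 0).toNat : Int) + 1) = n * n + n - 1 := by
        rw [hm]; ring
      simp only [hlast]
      rw [PySem.List.pyRange_of_pos _ _ (by norm_num : (0:Int) < 2),
        if_pos (by nlinarith : n * (n - 1) + 1 < n * n + n)]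
      have hcnt : ((n * n + n - (n * (n - 1) + 1) + 2 - 1) / 2).toNat = N := by
        have : n * n + n - (n * (n - 1) + 1) + 2 - 1 = 2 * n := by ring
        rw [this]; omega
      rw [hcnt, pvRevMapRange, List.append_nil]
      refine List.map_congr_left ?_
      intro i hi
      have hiN : i < N := List.mem_range.mp hi
      have hc : ((N - 1 - i : Nat) : Int) = n - 1 - i := by omega
      rw [hc]; ring
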